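-- pv_equiv track=rewrite | github.com/patsmad/advent-of-code-2025 | day_9.py | assign_points
-- ===== SOURCE A (Python) =====
-- def assign_points(points, lines):
--     in_points, out_points = [], []
--     for point in points:
--         num = 0
--         for line in lines:
--             if (line[0][0] == line[1][0] and
--                     point[0] > line[0][0] and
--                     (line[0][1] <= point[1] <= line[1][1] or line[1][1] <= point[1] <= line[0][1])):
--                 num += 1
--         if num % 2 == 0:
--             out_points.append(point)
--         else:
--             in_points.append(point)
--     return in_points, out_points
-- ===== SOURCE B (Python) =====
-- def assign_points(points, lines):
--     # preprocess: keep only vertical lines, normalized to (x, ylo, yhi), sorted by x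
--     segs = []
--     for (x1, y1), (x2, y2) in lines:
--         if x1 == x2:
--             segs.append((x1, min(y1, y2), max(y1, y2)))
--     segs.sort(key=lambda s: s[0])
--     in_points, out_points = [], []
--     for px, py in points:
--         odd = False
--         for x, lo, hi in segs:
--             if x >= px:
--                 break  # all remaining segments have x >= px too
--             if lo <= py <= hi:
--                 odd = not odd
--         if odd:
--             in_points.append((px, py))
--         else:
--             out_points.append((px, py))
--     return in_points, out_points
-- ===== Notes on version B (the rewrite author's own statement) =====
-- stated objective: faster
-- what changed: B preprocesses the lines once into normalized vertical segments (x, ylo, yhi) sorted by x, so each point's inner loop only walks the vertical segments and breaks as soon as x >= px, tracking a crossing-parity boolean instead of a count; A rescans the full line list per point.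
import Mathlib
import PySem

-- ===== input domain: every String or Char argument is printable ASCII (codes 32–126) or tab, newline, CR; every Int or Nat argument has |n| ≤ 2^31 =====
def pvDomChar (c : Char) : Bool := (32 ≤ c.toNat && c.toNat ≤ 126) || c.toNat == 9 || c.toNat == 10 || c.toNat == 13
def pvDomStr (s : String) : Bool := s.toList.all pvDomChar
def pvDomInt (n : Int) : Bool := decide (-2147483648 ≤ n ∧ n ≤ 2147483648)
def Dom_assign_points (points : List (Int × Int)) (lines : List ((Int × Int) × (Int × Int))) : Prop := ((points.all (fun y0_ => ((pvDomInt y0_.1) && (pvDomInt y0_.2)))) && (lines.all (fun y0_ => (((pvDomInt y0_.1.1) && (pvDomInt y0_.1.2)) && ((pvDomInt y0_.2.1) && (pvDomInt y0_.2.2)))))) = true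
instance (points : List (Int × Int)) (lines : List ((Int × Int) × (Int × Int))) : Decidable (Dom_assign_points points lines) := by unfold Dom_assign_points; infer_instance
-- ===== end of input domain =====

-- B preprocesses the lines once into normalized vertical segments sorted by x, then per point
-- walks only the segments with x < px (break on sortedness) keeping a crossing-parity boolean;
-- objective: faster by a constant-factor mechanism (filter + normalize once, early exit).

-- ===== PORT A =====
def assign_points (points : List (Int × Int)) (lines : List ((Int × Int) × (Int × Int))) : (List (Int × Int)) × (List (Int × Int)) :=
  points.foldl (fun acc point =>
    let num : Int := lines.foldl (fun n line =>
      if line.1.1 = line.2.1 ∧ point.1 > line.1.1 ∧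
          ((line.1.2 ≤ point.2 ∧ point.2 ≤ line.2.2) ∨ (line.2.2 ≤ point.2 ∧ point.2 ≤ line.1.2))
      then n + 1 else n) 0
    if num % 2 = 0 then (acc.1, acc.2 ++ [point]) else (acc.1 ++ [point], acc.2)) ([], [])

-- ===== PORT B =====
-- inner for-loop over segs with `break` when x >= px
def pvSegLoop (px py : Int) : List (Int × Int × Int) → Bool → Bool
  | [], odd => odd
  | s :: rest, odd =>
    if s.1 ≥ px then odd
    else pvSegLoop px py rest (if s.2.1 ≤ py ∧ py ≤ s.2.2 then !odd else odd)

def assign_points_alt (points : List (Int × Int)) (lines : List ((Int × Int) × (Int × Int))) : (List (Int × Int)) × (List (Int × Int)) :=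
  let segs0 : List (Int × Int × Int) := lines.foldl (fun acc l =>
    if l.1.1 = l.2.1 then acc ++ [(l.1.1, min l.1.2 l.2.2, max l.1.2 l.2.2)] else acc) []
  let segs := PySem.List.sorted segs0 (fun s => s.1) false
  points.foldl (fun acc p =>
    let odd := pvSegLoop p.1 p.2 segs false
    if odd then (acc.1 ++ [p], acc.2) else (acc.1, acc.2 ++ [p])) ([], [])

-- ===== PRECONDITION & SPEC =====
def Spec_assign_points (points : List (Int × Int)) (lines : List ((Int × Int) × (Int × Int))) (out : (List (Int × Int)) × (List (Int × Int))) : Prop := out = assign_points_alt points lines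
instance (points : List (Int × Int)) (lines : List ((Int × Int) × (Int × Int))) (out : (List (Int × Int)) × (List (Int × Int))) : Decidable (Spec_assign_points points lines out) := by unfold Spec_assign_points; infer_instance

-- ===== CLAIM (what is proved, stated in full; the proofs are below) =====
def Claim_equal_assign_points : Prop := ∀ (points : List (Int × Int)) (lines : List ((Int × Int) × (Int × Int))), Dom_assign_points points lines → Spec_assign_points points lines (assign_points points lines)

-- ===== LEMMAS AND PROOFS =====

-- A's predicate on a raw line, for a point p
def predA (p : Int × Int) (l : (Int × Int) × (Int × Int)) : Bool :=
  decide (l.1.1 = l.2.1 ∧ p.1 > l.1.1 ∧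
      ((l.1.2 ≤ p.2 ∧ p.2 ≤ l.2.2) ∨ (l.2.2 ≤ p.2 ∧ p.2 ≤ l.1.2)))

-- B's predicate on a normalized segment
def predC (p : Int × Int) (s : Int × Int × Int) : Bool :=
  decide (p.1 > s.1 ∧ s.2.1 ≤ p.2 ∧ p.2 ≤ s.2.2)

def segOf (l : (Int × Int) × (Int × Int)) : Option (Int × Int × Int) :=
  if l.1.1 = l.2.1 then some (l.1.1, min l.1.2 l.2.2, max l.1.2 l.2.2) else none

theorem segs0_eq_filterMap (lines : List ((Int × Int) × (Int × Int))) (acc : List (Int × Int × Int)) :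
    lines.foldl (fun acc l =>
      if l.1.1 = l.2.1 then acc ++ [(l.1.1, min l.1.2 l.2.2, max l.1.2 l.2.2)] else acc) acc
    = acc ++ lines.filterMap segOf := by
  induction lines generalizing acc with
  | nil => simp
  | cons l t ih =>
    simp only [List.foldl_cons, List.filterMap_cons, segOf]
    split_ifs with h
    · simp [ih, h, segOf]
    · simp [ih, segOf]

theorem num_eq_countP (p : Int × Int) (lines : List ((Int × Int) × (Int × Int))) :
    lines.foldl (fun n line =>
      if line.1.1 = line.2.1 ∧ p.1 > line.1.1 ∧
          ((line.1.2 ≤ p.2 ∧ p.2 ≤ line.2.2) ∨ (line.2.2 ≤ p.2 ∧ p.2 ≤ line.1.2))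
      then n + 1 else n) (0 : Int)
    = (lines.countP (predA p) : Int) := by
  have h : ∀ (a : Int), lines.foldl (fun n line =>
      if line.1.1 = line.2.1 ∧ p.1 > line.1.1 ∧
          ((line.1.2 ≤ p.2 ∧ p.2 ≤ line.2.2) ∨ (line.2.2 ≤ p.2 ∧ p.2 ≤ line.1.2))
      then n + 1 else n) a = a + (lines.countP (predA p) : Int) := by
    induction lines with
    | nil => simp
    | cons l t ih =>
      intro a
      simp only [List.foldl_cons, List.countP_cons, predA]
      by_cases h : l.1.1 = l.2.1 ∧ p.1 > l.1.1 ∧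
          ((l.1.2 ≤ p.2 ∧ p.2 ≤ l.2.2) ∨ (l.2.2 ≤ p.2 ∧ p.2 ≤ l.1.2))
      · rw [if_pos h, ih, if_pos (decide_eq_true h)]
        push_cast; ring
      · rw [if_neg h, ih, if_neg (fun hd => h (of_decide_eq_true hd))]
        push_cast; ring
  simpa using h 0

theorem countP_lines_eq_segs (p : Int × Int) (lines : List ((Int × Int) × (Int × Int))) :
    lines.countP (predA p) = (lines.filterMap segOf).countP (predC p) := by
  induction lines with
  | nil => rfl
  | cons l t ih =>
    simp only [List.countP_cons, List.filterMap_cons, segOf]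
    by_cases hv : l.1.1 = l.2.1
    · rw [if_pos hv, List.countP_cons, ih]
      have hb : predA p l = predC p (l.1.1, min l.1.2 l.2.2, max l.1.2 l.2.2) := by
        simp only [predA, predC]
        rw [decide_eq_decide]
        constructor
        · rintro ⟨-, h1, h2⟩
          exact ⟨h1, by omega, by omega⟩
        · rintro ⟨h1, h2, h3⟩
          refine ⟨hv, h1, ?_⟩
          rcases Int.le_total l.1.2 l.2.2 with h | h
          · left; constructor <;> omega
          · right; constructor <;> omega
      rw [hb]
      simp [segOf]
    · rw [if_neg hv, ih]
      have hb : predA p l = false := by simp [predA, hv]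
      rw [hb]
      simp [segOf]

-- the break-loop computes the parity of the count, on an x-sorted segment list
theorem pvSegLoop_parity (px py : Int) (segs : List (Int × Int × Int))
    (hs : segs.Pairwise (fun a b => a.1 ≤ b.1)) (b : Bool) :
    pvSegLoop px py segs b
      = (if segs.countP (predC (px, py)) % 2 = 1 then !b else b) := by
  induction segs generalizing b with
  | nil => simp [pvSegLoop]
  | cons s rest ih =>
    rcases List.pairwise_cons.mp hs with ⟨hall, hrest⟩
    by_cases hx : s.1 ≥ px
    · have hz : (s :: rest).countP (predC (px, py)) = 0 := by
        apply List.countP_eq_zero.mpr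
        intro t ht
        rcases List.mem_cons.mp ht with h | h
        · subst h; simp [predC]; omega
        · have := hall t h
          simp [predC]; omega
      simp [pvSegLoop, hx, hz]
    · have hx' : ¬ s.1 ≥ px := hx
      simp only [pvSegLoop, if_neg hx']
      rw [ih hrest]
      simp only [List.countP_cons]
      by_cases hc : s.2.1 ≤ py ∧ py ≤ s.2.2
      · have : predC (px, py) s = true := by simp [predC]; omega
        simp only [this, if_pos hc]
        rcases Nat.even_or_odd (rest.countP (predC (px, py))) with he | ho
        · have h1 : rest.countP (predC (px, py)) % 2 = 0 := Nat.even_iff.mp he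
          have h2 : (rest.countP (predC (px, py)) + 1) % 2 = 1 := by omega
          simp [h1, h2]
        · have h1 : rest.countP (predC (px, py)) % 2 = 1 := Nat.odd_iff.mp ho
          have h2 : (rest.countP (predC (px, py)) + 1) % 2 = 0 := by omega
          simp [h1, h2]
      · have : predC (px, py) s = false := by
          simp only [predC, decide_eq_false_iff_not]
          rintro ⟨-, h1, h2⟩
          exact hc ⟨h1, h2⟩
        simp [this, hc]

-- per point: A's evenness test agrees with B's parity boolean
theorem point_decision (p : Int × Int) (lines : List ((Int × Int) × (Int × Int))) :
    ((lines.foldl (fun n line =>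
      if line.1.1 = line.2.1 ∧ p.1 > line.1.1 ∧
          ((line.1.2 ≤ p.2 ∧ p.2 ≤ line.2.2) ∨ (line.2.2 ≤ p.2 ∧ p.2 ≤ line.1.2))
      then n + 1 else n) (0 : Int)) % 2 = 0)
    ↔ pvSegLoop p.1 p.2
        (PySem.List.sorted (lines.foldl (fun acc l =>
          if l.1.1 = l.2.1 then acc ++ [(l.1.1, min l.1.2 l.2.2, max l.1.2 l.2.2)] else acc) [])
          (fun s => s.1) false) false = false := by
  rw [num_eq_countP, segs0_eq_filterMap]
  set segs0 := lines.filterMap segOf with hsegs0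
  set segs := PySem.List.sorted ([] ++ segs0) (fun s => s.1) false with hsegs
  have hperm : segs.Perm ([] ++ segs0) := PySem.List.sorted_perm _ _ _
  have hpair : segs.Pairwise (fun a b => a.1 ≤ b.1) := PySem.List.sorted_pairwise _ _
  have hcnt : segs.countP (predC p) = segs0.countP (predC p) := by
    simpa using hperm.countP_eq (predC p)
  rw [pvSegLoop_parity p.1 p.2 segs hpair false]
  have hp : p = (p.1, p.2) := rfl
  rw [← hp, hcnt, ← countP_lines_eq_segs p lines]
  set n := lines.countP (predA p)
  constructor
  · intro h
    have : (n : Int) % 2 = 0 := h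
    have hn : n % 2 = 0 := by omega
    simp [hn]
  · intro h
    by_cases hn : n % 2 = 1
    · simp [hn] at h
    · have : n % 2 = 0 := by omega
      omega

theorem outer_eq (lines : List ((Int × Int) × (Int × Int))) (points : List (Int × Int))
    (acc : List (Int × Int) × List (Int × Int)) :
    points.foldl (fun acc point =>
      let num : Int := lines.foldl (fun n line =>
        if line.1.1 = line.2.1 ∧ point.1 > line.1.1 ∧
            ((line.1.2 ≤ point.2 ∧ point.2 ≤ line.2.2) ∨ (line.2.2 ≤ point.2 ∧ point.2 ≤ line.1.2))
        then n + 1 else n) 0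
      if num % 2 = 0 then (acc.1, acc.2 ++ [point]) else (acc.1 ++ [point], acc.2)) acc
    = points.foldl (fun acc p =>
      let odd := pvSegLoop p.1 p.2
        (PySem.List.sorted (lines.foldl (fun acc l =>
          if l.1.1 = l.2.1 then acc ++ [(l.1.1, min l.1.2 l.2.2, max l.1.2 l.2.2)] else acc) [])
          (fun s => s.1) false) false
      if odd then (acc.1 ++ [p], acc.2) else (acc.1, acc.2 ++ [p])) acc := by
  induction points generalizing acc with
  | nil => rfl
  | cons p t ih =>
    simp only [List.foldl_cons]
    have hd := point_decision p lines
    by_cases h : (lines.foldl (fun n line =>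
        if line.1.1 = line.2.1 ∧ p.1 > line.1.1 ∧
            ((line.1.2 ≤ p.2 ∧ p.2 ≤ line.2.2) ∨ (line.2.2 ≤ p.2 ∧ p.2 ≤ line.1.2))
        then n + 1 else n) (0 : Int)) % 2 = 0
    · have hodd : pvSegLoop p.1 p.2 _ false = false := hd.mp h
      simp only [h, hodd, if_pos, Bool.false_eq_true, if_false]
      exact ih _
    · have hodd : pvSegLoop p.1 p.2
        (PySem.List.sorted (lines.foldl (fun acc l =>
          if l.1.1 = l.2.1 then acc ++ [(l.1.1, min l.1.2 l.2.2, max l.1.2 l.2.2)] else acc) [])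
          (fun s => s.1) false) false = true := by
        cases hv : pvSegLoop p.1 p.2
          (PySem.List.sorted (lines.foldl (fun acc l =>
            if l.1.1 = l.2.1 then acc ++ [(l.1.1, min l.1.2 l.2.2, max l.1.2 l.2.2)] else acc) [])
            (fun s => s.1) false) false
        · exact absurd (hd.mpr hv) h
        · rfl
      simp only [h, hodd, if_false, if_true]
      exact ih _

-- ===== VERDICT (by name: the statement is the Claim_ definition above) =====
theorem assign_points_spec : Claim_equal_assign_points := by
  intro points lines _
  unfold Spec_assign_points assign_points assign_points_alt
  exact outer_eq lines points ([], [])
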